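-- pv_equiv track=rewrite | github.com/prathameshks/CP | GFG/POTD_04_08.py | print_next_greater_freq
-- ===== SOURCE A (Python) =====
-- import collections
--
-- def print_next_greater_freq(arr, n):
--     cnt = collections.Counter(arr)
--     new = [cnt[i] for i in arr]
--     ans = []
--     for j in range(n):
--         for x in range(j + 1,n):
--             if (new[x] > new[j]) and (arr[j] != arr[x]):
--                 ans.append(arr[x])
--                 break
--         else:
--             ans.append(-1)
--     return ans
-- ===== SOURCE B (Python) =====
-- import collections
--
-- def print_next_greater_freq(arr, n):
--     cnt = collections.Counter(arr)
--     ans = [-1] * max(n, 0)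
--     stack = []
--     for j in range(n):
--         f = cnt[arr[j]]
--         while stack and cnt[arr[stack[-1]]] < f:
--             ans[stack.pop()] = arr[j]
--         stack.append(j)
--     return ans
-- ===== Notes on version B (the rewrite author's own statement) =====
-- stated objective: faster
-- what changed: Replaces the quadratic per-index forward scan with a single left-to-right pass over the first n elements using a monotonic stack of unresolved indices (popping an index when an element of strictly greater frequency arrives), writing answers into a preallocated array.
-- outside the precondition, e.g. on print_next_greater_freq([], 1): A returns [-1], B raises IndexError
import Mathlib
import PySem

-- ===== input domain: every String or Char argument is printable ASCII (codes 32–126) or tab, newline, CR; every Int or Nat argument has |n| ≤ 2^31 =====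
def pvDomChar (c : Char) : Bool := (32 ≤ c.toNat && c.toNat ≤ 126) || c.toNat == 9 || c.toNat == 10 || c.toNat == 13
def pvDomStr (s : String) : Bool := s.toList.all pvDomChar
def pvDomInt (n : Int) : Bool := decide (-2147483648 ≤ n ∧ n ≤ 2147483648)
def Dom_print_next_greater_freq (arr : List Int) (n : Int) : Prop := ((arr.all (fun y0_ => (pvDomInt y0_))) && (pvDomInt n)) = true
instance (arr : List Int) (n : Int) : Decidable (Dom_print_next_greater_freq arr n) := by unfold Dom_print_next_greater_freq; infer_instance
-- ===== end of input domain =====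

-- B replaces A's quadratic per-index forward scan by a single monotonic-stack pass (objective: faster).

-- ===== PORT A =====
-- inner 'for x in range(j+1, n): … break / else: append(-1)' of A: returns the value appended for index j
def pvFindA (arr new : List Int) (j : Int) : List Int → Int
  | [] => -1
  | x :: rest =>
    if PySem.List.pyGetD new x 0 > PySem.List.pyGetD new j 0 ∧ ¬ (PySem.List.pyGetD arr j 0 = PySem.List.pyGetD arr x 0)
    then PySem.List.pyGetD arr x 0
    else pvFindA arr new j rest

def print_next_greater_freq (arr : List Int) (n : Int) : List Int :=
  let cnt := PySem.Dict.counter arr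
  let new := arr.map (fun i => cnt.getD i 0)
  (PySem.List.pyRange 0 n 1).foldl
    (fun ans j => ans ++ [pvFindA arr new j (PySem.List.pyRange (j + 1) n 1)]) []

-- ===== PORT B =====
-- the 'while stack and cnt[arr[stack[-1]]] < f: ans[stack.pop()] = arr[j]' loop of B (stack top = list head)
def pvPopB (arr : List Int) (cnt : PySem.Dict Int Int) (f aj : Int) : List Int → List Int → List Int × List Int
  | [], ans => ([], ans)
  | i :: st, ans =>
    if cnt.getD (PySem.List.pyGetD arr i 0) 0 < f
    then pvPopB arr cnt f aj st (PySem.List.pySetD ans i aj)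
    else (i :: st, ans)

def print_next_greater_freq_alt (arr : List Int) (n : Int) : List Int :=
  let cnt := PySem.Dict.counter arr
  let res := (PySem.List.pyRange 0 n 1).foldl
    (fun (s : List Int × List Int) j =>
      let f := cnt.getD (PySem.List.pyGetD arr j 0) 0
      let p := pvPopB arr cnt f (PySem.List.pyGetD arr j 0) s.1 s.2
      (j :: p.1, p.2))
    ([], List.replicate (max n 0).toNat (-1))
  res.2

-- ===== PRECONDITION & SPEC =====
-- Pre_ excludes the inputs with n > len(arr): there A raises IndexError while scanning, except in the lone corner arr = [], n = 1 (the inner scan range is empty) where A returns [-1]; B's single pass indexes arr[j] for every j < n and raises IndexError on all of them.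
def Pre_print_next_greater_freq (arr : List Int) (n : Int) : Prop := n ≤ (arr.length : Int)
instance (arr : List Int) (n : Int) : Decidable (Pre_print_next_greater_freq arr n) := by
  unfold Pre_print_next_greater_freq; infer_instance

def pvWitness_print_next_greater_freq : List Int × Int := ([1, 1, 2, 3, 3, 3], 6)

def Spec_print_next_greater_freq (arr : List Int) (n : Int) (out : List Int) : Prop := out = print_next_greater_freq_alt arr n
instance (arr : List Int) (n : Int) (out : List Int) : Decidable (Spec_print_next_greater_freq arr n out) := by unfold Spec_print_next_greater_freq; infer_instance

-- ===== CLAIM (what is proved, stated in full; the proofs are below) =====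
def Claim_equal_print_next_greater_freq : Prop := ∀ (arr : List Int) (n : Int), Dom_print_next_greater_freq arr n → Pre_print_next_greater_freq arr n → Spec_print_next_greater_freq arr n (print_next_greater_freq arr n)

-- ===== LEMMAS AND PROOFS =====

-- value at index i (total form; indices used lie in range under Pre_)
def pvVal (arr : List Int) (i : Int) : Int := PySem.List.pyGetD arr i 0
-- frequency of the value at index i
def pvCnt (arr : List Int) (i : Int) : Int := (arr.count (pvVal arr i) : Int)
-- the common specification: first index x in (j, n) whose value has strictly greater frequency
def pvOut (arr : List Int) (n j : Int) : Int :=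
  match (PySem.List.pyRange (j + 1) n 1).find? (fun x => decide (pvCnt arr j < pvCnt arr x)) with
  | some x => pvVal arr x
  | none => -1

theorem newVal_eq (arr : List Int) (x : Int) (hx0 : 0 ≤ x) (hx : x < (arr.length : Int)) :
    PySem.List.pyGetD (arr.map (fun i => (PySem.Dict.counter arr).getD i 0)) x 0 = pvCnt arr x := by
  have hlen : ((arr.map (fun i => (PySem.Dict.counter arr).getD i 0)).length : Int) = (arr.length : Int) := by
    simp
  rw [PySem.List.pyGetD_eq_getElem _ 0 hx0 (by rw [hlen]; exact hx)]
  rw [pvCnt, pvVal, PySem.List.pyGetD_eq_getElem _ 0 hx0 hx]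
  simp [PySem.Dict.getD_counter]

theorem findA_eq (arr new : List Int) (n j : Int)
    (hnew : new = arr.map (fun i => (PySem.Dict.counter arr).getD i 0))
    (hn : n ≤ (arr.length : Int)) (hj0 : 0 ≤ j) (hjn : j < n)
    (L : List Int) (hL : ∀ x ∈ L, 0 ≤ x ∧ x < (arr.length : Int)) :
    pvFindA arr new j L =
      (match L.find? (fun x => decide (pvCnt arr j < pvCnt arr x)) with
       | some x => pvVal arr x
       | none => -1) := by
  induction L with
  | nil => rfl
  | cons x rest ih =>
    have hx := hL x (List.mem_cons_self)
    have hjv : PySem.List.pyGetD new j 0 = pvCnt arr j := by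
      rw [hnew]; exact newVal_eq arr j hj0 (lt_of_lt_of_le hjn hn)
    have hxv : PySem.List.pyGetD new x 0 = pvCnt arr x := by
      rw [hnew]; exact newVal_eq arr x hx.1 hx.2
    by_cases h : pvCnt arr j < pvCnt arr x
    · have hne : ¬ (PySem.List.pyGetD arr j 0 = PySem.List.pyGetD arr x 0) := by
        intro heq
        have : pvCnt arr j = pvCnt arr x := by
          simp only [pvCnt, pvVal, heq]
        omega
      rw [pvFindA, if_pos ⟨by rw [hjv, hxv]; exact h, hne⟩]
      rw [List.find?_cons_of_pos (by simpa using h)]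
      rfl
    · rw [pvFindA, if_neg (by
        rintro ⟨hgt, -⟩
        rw [hjv, hxv] at hgt
        exact h hgt)]
      rw [List.find?_cons_of_neg (by simpa using h)]
      exact ih (fun y hy => hL y (List.mem_cons_of_mem _ hy))

theorem portA_eq (arr : List Int) (n : Int) (hn : n ≤ (arr.length : Int)) :
    print_next_greater_freq arr n = (PySem.List.pyRange 0 n 1).map (pvOut arr n) := by
  unfold print_next_greater_freq
  rw [PySem.List.foldl_append_singleton_eq_map]
  rw [List.nil_append]
  apply List.map_congr_left
  intro j hj
  have hjr := (PySem.List.mem_pyRange_one).1 hj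
  rw [pvOut]
  exact findA_eq arr _ n j rfl hn hjr.1 hjr.2 _
    (fun x hx => by
      have := (PySem.List.mem_pyRange_one).1 hx
      constructor <;> omega)

-- the body of B's fold, with the counter inlined
def pvStepB (arr : List Int) (s : List Int × List Int) (j : Int) : List Int × List Int :=
  let cnt := PySem.Dict.counter arr
  let f := cnt.getD (PySem.List.pyGetD arr j 0) 0
  let p := pvPopB arr cnt f (PySem.List.pyGetD arr j 0) s.1 s.2
  (j :: p.1, p.2)

-- B's state after processing the first k indices
def pvStB (arr : List Int) (n : Int) (k : Nat) : List Int × List Int :=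
  (PySem.List.pyRange 0 (k : Int) 1).foldl (pvStepB arr) ([], List.replicate n.toNat (-1))

-- the pop loop takes/drops the maximal prefix of the stack with smaller frequency
theorem popB_eq (arr : List Int) (f aj : Int) :
    ∀ (st ans : List Int),
      pvPopB arr (PySem.Dict.counter arr) f aj st ans =
        (st.dropWhile (fun i => decide (pvCnt arr i < f)),
         (st.takeWhile (fun i => decide (pvCnt arr i < f))).foldl
           (fun a i => PySem.List.pySetD a i aj) ans) := by
  intro st
  induction st with
  | nil => intro ans; rfl
  | cons i st ih =>
    intro ans
    by_cases h : pvCnt arr i < f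
    · rw [pvPopB, if_pos (by simpa [pvCnt, pvVal, PySem.Dict.getD_counter] using h)]
      rw [List.takeWhile_cons_of_pos (by simpa using h), List.dropWhile_cons_of_pos (by simpa using h)]
      rw [ih]
      rfl
    · rw [pvPopB, if_neg (by simpa [pvCnt, pvVal, PySem.Dict.getD_counter] using h)]
      rw [List.takeWhile_cons_of_neg (by simpa using h), List.dropWhile_cons_of_neg (by simpa using h)]
      rfl

theorem foldl_set_length (aj : Int) :
    ∀ (P ans : List Int), ((P.foldl (fun a i => PySem.List.pySetD a i aj) ans)).length = ans.length := by
  intro P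
  induction P with
  | nil => intro ans; rfl
  | cons i P ih => intro ans; rw [List.foldl_cons, ih, PySem.List.length_pySetD]

theorem foldl_set_getD (aj : Int) :
    ∀ (P ans : List Int) (t : Int), (∀ i ∈ P, 0 ≤ i ∧ i < (ans.length : Int)) → 0 ≤ t →
      PySem.List.pyGetD (P.foldl (fun a i => PySem.List.pySetD a i aj) ans) t 0 =
        if t ∈ P then aj else PySem.List.pyGetD ans t 0 := by
  intro P
  induction P with
  | nil => intro ans t _ _; simp
  | cons i P ih =>
    intro ans t hP ht
    have hi := hP i List.mem_cons_self
    rw [List.foldl_cons]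
    rw [ih (PySem.List.pySetD ans i aj) t
        (by intro x hx; rw [PySem.List.length_pySetD]; exact hP x (List.mem_cons_of_mem _ hx)) ht]
    have hset : PySem.List.pyGetD (PySem.List.pySetD ans i aj) t 0 =
        if t = i then aj else PySem.List.pyGetD ans t 0 := by
      have hi' : i = ((i.toNat : Nat) : Int) := by omega
      have ht' : t = ((t.toNat : Nat) : Int) := by omega
      rw [hi', ht', PySem.List.pyGetD_pySetD_natCast ans i.toNat t.toNat aj 0 (by omega)]
      by_cases he : t = i
      · rw [if_pos (by omega), if_pos (by omega)]
      · rw [if_neg (by omega), if_neg (by omega)]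
    by_cases hmem : t ∈ P
    · rw [if_pos hmem, if_pos (List.mem_cons_of_mem _ hmem)]
    · rw [if_neg hmem]
      by_cases he : t = i
      · rw [hset, if_pos he, if_pos (by rw [he]; exact List.mem_cons_self)]
      · rw [hset, if_neg he, if_neg (by simp [he, hmem])]

-- the loop invariant of B's single pass
def pvInv (arr : List Int) (n : Int) (k : Nat) (s : List Int × List Int) : Prop :=
  s.2.length = n.toNat ∧
  (∀ i ∈ s.1, 0 ≤ i ∧ i < (k : Int)) ∧
  s.1.Pairwise (fun p q => q < p ∧ pvCnt arr p ≤ pvCnt arr q) ∧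
  (∀ i ∈ s.1, ∀ x : Int, i < x → x < (k : Int) → pvCnt arr x ≤ pvCnt arr i) ∧
  (∀ i : Int, 0 ≤ i → i < (k : Int) → i ∉ s.1 →
    ∃ x, (PySem.List.pyRange (i + 1) n 1).find? (fun y => decide (pvCnt arr i < pvCnt arr y)) = some x ∧
      x < (k : Int) ∧ PySem.List.pyGetD s.2 i 0 = pvVal arr x) ∧
  (∀ i : Int, 0 ≤ i → i < n → (i ∈ s.1 ∨ (k : Int) ≤ i) → PySem.List.pyGetD s.2 i 0 = -1)

theorem find_some_of_first (arr : List Int) (n i j : Int) (hij : i < j) (hjn : j < n)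
    (hbetween : ∀ x : Int, i < x → x < j → pvCnt arr x ≤ pvCnt arr i)
    (hj : pvCnt arr i < pvCnt arr j) :
    (PySem.List.pyRange (i + 1) n 1).find? (fun y => decide (pvCnt arr i < pvCnt arr y)) = some j := by
  rw [PySem.List.pyRange_one_append (i + 1) j n (by omega) (by omega), List.find?_append]
  have h1 : (PySem.List.pyRange (i + 1) j 1).find? (fun y => decide (pvCnt arr i < pvCnt arr y)) = none := by
    rw [List.find?_eq_none]
    intro x hx
    have := (PySem.List.mem_pyRange_one).1 hx
    simpa using not_lt.2 (hbetween x (by omega) (by omega))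
  rw [h1, PySem.List.pyRange_one_cons hjn, List.find?_cons_of_pos (by simpa using hj)]
  rfl

theorem pvInv_init (arr : List Int) (n : Int) (_hn : 0 ≤ n) :
    pvInv arr n 0 ([], List.replicate n.toNat (-1)) := by
  refine ⟨by simp, by simp, by simp, by simp, by intro i _ hi _; omega, ?_⟩
  intro i h0 hi _
  rw [PySem.List.pyGetD_eq_getElem _ 0 h0 (by simp; omega)]
  exact List.getElem_replicate _

theorem pvInv_step (arr : List Int) (n : Int) (k : Nat) (hn : 0 ≤ n) (hk : (k : Int) < n)
    (s : List Int × List Int) (h : pvInv arr n k s) :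
    pvInv arr n (k + 1) (pvStepB arr s (k : Int)) := by
  obtain ⟨h1, h2, h3, h4, h5, h6⟩ := h
  obtain ⟨st, ans⟩ := s
  dsimp only at h1 h2 h3 h4 h5 h6
  have hf : (PySem.Dict.counter arr).getD (PySem.List.pyGetD arr (k : Int) 0) 0 = pvCnt arr (k : Int) := by
    simp [pvCnt, pvVal, PySem.Dict.getD_counter]
  have hstep : pvStepB arr (st, ans) (k : Int) =
      ((k : Int) :: (st.dropWhile (fun i => decide (pvCnt arr i < pvCnt arr (k : Int)))),
       (st.takeWhile (fun i => decide (pvCnt arr i < pvCnt arr (k : Int)))).foldl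
         (fun a i => PySem.List.pySetD a i (pvVal arr (k : Int))) ans) := by
    show ((k : Int) :: (pvPopB arr _ _ _ st ans).1, (pvPopB arr _ _ _ st ans).2) = _
    rw [hf, popB_eq]
    rfl
  rw [hstep]
  set q : Int → Bool := fun i => decide (pvCnt arr i < pvCnt arr (k : Int)) with hq
  set P := st.takeWhile q with hPdef
  set R := st.dropWhile q with hRdef
  have hPR : P ++ R = st := List.takeWhile_append_dropWhile
  have hPmem : ∀ i ∈ P, i ∈ st := fun i hi => (List.takeWhile_sublist q).mem hi
  have hRmem : ∀ i ∈ R, i ∈ st := fun i hi => (List.dropWhile_sublist q).mem hi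
  have hPlt : ∀ i ∈ P, pvCnt arr i < pvCnt arr (k : Int) := by
    intro i hi
    have := List.mem_takeWhile_imp hi
    simpa [hq] using this
  have hRpw : R.Pairwise (fun p q => q < p ∧ pvCnt arr p ≤ pvCnt arr q) :=
    List.Pairwise.sublist (List.dropWhile_sublist q) h3
  have hRge : ∀ i ∈ R, pvCnt arr (k : Int) ≤ pvCnt arr i := by
    have hhead := List.head?_dropWhile_not q st
    rw [← hRdef] at hhead
    intro i hi
    cases hRc : R with
    | nil => rw [hRc] at hi; simp at hi
    | cons r R' =>
      rw [hRc] at hi hhead hRpw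
      have hr : pvCnt arr (k : Int) ≤ pvCnt arr r := by
        simp [hq] at hhead
        exact hhead
      rcases List.mem_cons.1 hi with rfl | hi'
      · exact hr
      · exact le_trans hr ((List.pairwise_cons.1 hRpw).1 i hi').2
  have hansP : ∀ i ∈ P, 0 ≤ i ∧ i < (ans.length : Int) := by
    intro i hi
    have := h2 i (hPmem i hi)
    constructor
    · exact this.1
    · have : i < (k : Int) := this.2
      omega
  have hgetD : ∀ t : Int, 0 ≤ t →
      PySem.List.pyGetD ((P.foldl (fun a i => PySem.List.pySetD a i (pvVal arr (k : Int))) ans)) t 0 =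
        if t ∈ P then pvVal arr (k : Int) else PySem.List.pyGetD ans t 0 :=
    fun t ht => foldl_set_getD _ P ans t hansP ht
  refine ⟨?_, ?_, ?_, ?_, ?_, ?_⟩
  · exact (foldl_set_length _ P ans).trans h1
  · intro i hi
    rcases List.mem_cons.1 hi with rfl | hi'
    · push_cast; omega
    · have := h2 i (hRmem i hi')
      push_cast
      omega
  · rw [List.pairwise_cons]
    constructor
    · intro i hi
      exact ⟨(h2 i (hRmem i hi)).2, hRge i hi⟩
    · exact hRpw
  · intro i hi x hix hx
    rcases List.mem_cons.1 hi with rfl | hi'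
    · push_cast at hx ⊢; omega
    · have hik := (h2 i (hRmem i hi')).2
      by_cases hxk : x < (k : Int)
      · exact h4 i (hRmem i hi') x hix hxk
      · have hxeq : x = (k : Int) := by push_cast at hx ⊢; omega
        rw [hxeq]
        exact hRge i hi'
  · intro i h0 hik hnotin
    have hik' : i ∉ R := fun hc => hnotin (List.mem_cons_of_mem _ hc)
    have hink : i ≠ (k : Int) := fun hc => hnotin (by rw [hc]; exact List.mem_cons_self)
    have hikk : i < (k : Int) := by push_cast at hik; omega
    by_cases hiP : i ∈ P
    · -- popped now: the first greater-frequency index of i is exactly k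
      refine ⟨(k : Int), ?_, by push_cast; omega, ?_⟩
      · exact find_some_of_first arr n i (k : Int) hikk hk
          (fun x hx1 hx2 => h4 i (hPmem i hiP) x hx1 hx2) (hPlt i hiP)
      · rw [hgetD i h0, if_pos hiP]
    · -- resolved earlier: its answer cell is untouched
      have hst : i ∉ st := by rw [← hPR]; simp [hiP, hik']
      obtain ⟨x, hx1, hx2, hx3⟩ := h5 i h0 hikk hst
      refine ⟨x, hx1, by omega, ?_⟩
      rw [hgetD i h0, if_neg hiP, hx3]
  · intro i h0 hin hcase
    have hiP : i ∉ P := by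
      intro hc
      have := hPlt i hc
      rcases hcase with hmem | hge
      · rcases List.mem_cons.1 hmem with rfl | hmem'
        · omega
        · have := hRge i hmem'
          omega
      · have := (h2 i (hPmem i hc)).2
        push_cast at hge
        omega
    rw [hgetD i h0, if_neg hiP]
    rcases hcase with hmem | hge
    · rcases List.mem_cons.1 hmem with rfl | hmem'
      · exact h6 _ h0 hin (Or.inr le_rfl)
      · exact h6 i h0 hin (Or.inl (hRmem i hmem'))
    · exact h6 i h0 hin (Or.inr (by push_cast at hge ⊢; omega))

theorem pvInv_all (arr : List Int) (n : Int) (hn : 0 ≤ n) :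
    ∀ (k : Nat), (k : Int) ≤ n → pvInv arr n k (pvStB arr n k) := by
  intro k
  induction k with
  | zero =>
    intro _
    have : pvStB arr n 0 = ([], List.replicate n.toNat (-1)) := by
      rw [pvStB]
      norm_num [PySem.List.pyRange_one_eq_nil]
    rw [this]
    exact pvInv_init arr n hn
  | succ k ih =>
    intro hk
    have hk' : (k : Int) < n := by push_cast at hk; omega
    have hstep : pvStB arr n (k + 1) = pvStepB arr (pvStB arr n k) (k : Int) := by
      rw [pvStB, pvStB]
      have : ((k + 1 : Nat) : Int) = (k : Int) + 1 := by push_cast; ring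
      rw [this, PySem.List.pyRange_one_succ_right (by positivity), List.foldl_append, List.foldl_cons, List.foldl_nil]
    rw [hstep]
    exact pvInv_step arr n k hn hk' _ (ih (le_of_lt hk'))

theorem portB_eq (arr : List Int) (n : Int) :
    print_next_greater_freq_alt arr n = (PySem.List.pyRange 0 n 1).map (pvOut arr n) := by
  rcases le_or_gt n 0 with hn | hn
  · rw [print_next_greater_freq_alt, PySem.List.pyRange_one_eq_nil hn]
    simp
    omega
  · have hn0 : 0 ≤ n := le_of_lt hn
    have hmn : ((n.toNat : Nat) : Int) = n := by omega
    have hport : print_next_greater_freq_alt arr n = (pvStB arr n n.toNat).2 := by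
      rw [print_next_greater_freq_alt, pvStB, hmn]
      have hmax : (max n 0).toNat = n.toNat := by omega
      rw [hmax]
      rfl
    obtain ⟨h1, h2, h3, h4, h5, h6⟩ := pvInv_all arr n hn0 n.toNat (by omega)
    rw [hport]
    apply List.ext_getElem
    · rw [h1]
      simp [PySem.List.length_pyRange_one]
    · intro t ht1 ht2
      have htn : (t : Int) < n := by
        rw [h1] at ht1
        omega
      have hmap : ((PySem.List.pyRange 0 n 1).map (pvOut arr n))[t] = pvOut arr n (t : Int) := by
        rw [List.getElem_map, PySem.List.getElem_pyRange_one]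
        norm_num
      rw [hmap]
      have hget : ((pvStB arr n n.toNat).2)[t] = PySem.List.pyGetD (pvStB arr n n.toNat).2 (t : Int) 0 := by
        rw [PySem.List.pyGetD_eq_getElem _ 0 (by positivity) (by rw [h1]; omega)]
        simp
      rw [hget]
      by_cases hmem : (t : Int) ∈ (pvStB arr n n.toNat).1
      · -- still on the stack: no later index has greater frequency
        rw [h6 (t : Int) (by positivity) htn (Or.inl hmem)]
        rw [pvOut]
        have hnone : (PySem.List.pyRange ((t : Int) + 1) n 1).find?
            (fun x => decide (pvCnt arr (t : Int) < pvCnt arr x)) = none := by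
          rw [List.find?_eq_none]
          intro x hx
          have hxr := (PySem.List.mem_pyRange_one).1 hx
          have := h4 (t : Int) hmem x (by omega) (by rw [hmn]; omega)
          simpa using not_lt.2 this
        rw [hnone]
      · obtain ⟨x, hx1, _, hx3⟩ := h5 (t : Int) (by positivity) (by rw [hmn]; omega) hmem
        rw [hx3, pvOut, hx1]

-- ===== VERDICT (by name: the statement is the Claim_ definition above) =====
theorem print_next_greater_freq_spec : Claim_equal_print_next_greater_freq := by
  intro arr n _ hpre
  unfold Spec_print_next_greater_freq
  rw [portA_eq arr n hpre, portB_eq arr n]
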